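-- pv_equiv track=rewrite | github.com/PrinceSinghhub/InterviewBit-Hashing | InterviewBit Hashing/Subarray with equal occurences!.py | solve
-- ===== SOURCE A (Python) =====
-- from collections import defaultdict
--
-- def solve(A, B, C):
--     n = len(A); ans = 0; diff=0
--     d = defaultdict(int)
--     d[0] = 1
--
--     for x in A:
--         if x==B: diff+=1
--         if x==C: diff-=1
--         ans+= d[diff]
--         d[diff]+= 1
--
--     return ans
-- ===== SOURCE B (Python) =====
-- def solve(A, B, C):
--     n = len(A)
--     ans = 0
--     for i in range(n):
--         cb = 0
--         cc = 0
--         for j in range(i, n):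
--             if A[j] == B:
--                 cb += 1
--             if A[j] == C:
--                 cc += 1
--             if cb == cc:
--                 ans += 1
--     return ans
-- ===== Notes on version B (the rewrite author's own statement) =====
-- stated objective: alternative
-- what changed: Replaces the single-pass prefix-difference hashmap count with a nested double loop that re-scans each subarray start, maintaining per-subarray running counts of B and C and counting whenever they are equal.
import Mathlib
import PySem

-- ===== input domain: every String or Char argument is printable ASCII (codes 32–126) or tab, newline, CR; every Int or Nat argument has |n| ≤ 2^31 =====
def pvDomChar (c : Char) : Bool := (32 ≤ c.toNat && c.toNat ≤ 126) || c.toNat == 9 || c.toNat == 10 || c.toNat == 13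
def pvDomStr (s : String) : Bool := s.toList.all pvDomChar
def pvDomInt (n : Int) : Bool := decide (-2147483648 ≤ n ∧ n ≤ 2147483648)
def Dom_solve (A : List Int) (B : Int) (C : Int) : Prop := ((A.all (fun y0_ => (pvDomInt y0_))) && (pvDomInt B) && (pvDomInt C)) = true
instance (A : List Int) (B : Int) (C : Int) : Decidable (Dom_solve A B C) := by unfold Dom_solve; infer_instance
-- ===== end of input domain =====

-- B replaces A's one-pass prefix-difference hashmap with a nested double loop over
-- subarray starts (alternative decomposition, not faster); return values are equal.

-- ===== PORT A =====
def solve (A : List Int) (B : Int) (C : Int) : Int :=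
  (A.foldl (fun (s : Int × Int × PySem.Dict Int Int) x =>
      let diff1 := if x = B then s.2.1 + 1 else s.2.1
      let diff2 := if x = C then diff1 - 1 else diff1
      let ans := s.1 + s.2.2.getD diff2 0
      (ans, diff2, s.2.2.insert diff2 (s.2.2.getD diff2 0 + 1)))
    (0, 0, (PySem.Dict.empty).insert 0 1)).1

-- ===== PORT B =====
def solve_alt (A : List Int) (B : Int) (C : Int) : Int :=
  (PySem.List.pyRange 0 (A.length : Int) 1).foldl (fun ans i =>
    ((PySem.List.pyRange i (A.length : Int) 1).foldl (fun (s : Int × Int × Int) j =>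
        let cb := if PySem.List.pyGetD A j 0 = B then s.2.1 + 1 else s.2.1
        let cc := if PySem.List.pyGetD A j 0 = C then s.2.2 + 1 else s.2.2
        let a := if cb = cc then s.1 + 1 else s.1
        (a, cb, cc)) (ans, 0, 0)).1) 0

-- ===== PRECONDITION & SPEC =====
def Spec_solve (A : List Int) (B : Int) (C : Int) (out : Int) : Prop := out = solve_alt A B C
instance (A : List Int) (B : Int) (C : Int) (out : Int) : Decidable (Spec_solve A B C out) := by unfold Spec_solve; infer_instance

-- ===== CLAIM (what is proved, stated in full; the proofs are below) =====
def Claim_equal_solve : Prop := ∀ (A : List Int) (B : Int) (C : Int), Dom_solve A B C → Spec_solve A B C (solve A B C)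

-- ===== LEMMAS AND PROOFS =====

-- per-element contribution to the running difference #B - #C
def dval (B C x : Int) : Int := (if x = B then 1 else 0) - (if x = C then 1 else 0)

-- list of successive prefix differences, starting from t (excluding t itself)
def pdiffs (B C : Int) (t : Int) : List Int → List Int
  | [] => []
  | x :: xs => (t + dval B C x) :: pdiffs B C (t + dval B C x) xs

-- number of equal pairs in a list, counted suffix-wise
def pairsSuf : List Int → Nat
  | [] => 0
  | x :: l => l.count x + pairsSuf l

-- number of equal pairs, counted prefix-wise against an accumulated 'seen' list
def pairsPre : List Int → List Int → Nat
  | _, [] => 0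
  | seen, v :: l => seen.count v + pairsPre (v :: seen) l

lemma pdiffs_add (B C : Int) (xs : List Int) : ∀ (a t : Int),
    pdiffs B C (a + t) xs = (pdiffs B C t xs).map (a + ·) := by
  induction xs with
  | nil => intro a t; simp [pdiffs]
  | cons x xs ih =>
    intro a t
    simp only [pdiffs, List.map_cons]
    have h : a + t + dval B C x = a + (t + dval B C x) := by ring
    rw [h, ih]

lemma count_map_add (a v : Int) (l : List Int) : (l.map (a + ·)).count (a + v) = l.count v := by
  induction l with
  | nil => simp
  | cons x l ih =>
    simp only [List.map_cons, List.count_cons, ih]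
    by_cases h : x = v
    · simp [h]
    · have h2 : ¬ (a + x = a + v) := by omega
      simp [h, h2]

lemma pairsSuf_map_add (a : Int) (l : List Int) : pairsSuf (l.map (a + ·)) = pairsSuf l := by
  induction l with
  | nil => rfl
  | cons x l ih => simp only [List.map_cons, pairsSuf, ih, count_map_add]

lemma sum_count_singleton (z : Int) (l : List Int) :
    (l.map (fun v => List.count v [z])).sum = l.count z := by
  induction l with
  | nil => simp
  | cons x l ih =>
    simp only [List.map_cons, List.sum_cons, ih]
    rw [List.count_cons]
    by_cases h : x = z
    · simp [h]; omega
    · have h' : ¬ z = x := fun hh => h hh.symm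
      simp [h, h']

lemma pairsPre_eq (l : List Int) : ∀ (seen : List Int),
    pairsPre seen l = pairsSuf l + (l.map (fun v => seen.count v)).sum := by
  induction l with
  | nil => intro seen; simp [pairsPre, pairsSuf]
  | cons v l ih =>
    intro seen
    have hcnt : ∀ (l : List Int), (l.map (fun y => List.count y (v :: seen))).sum
        = l.count v + (l.map (fun y => seen.count y)).sum := by
      intro l
      induction l with
      | nil => simp
      | cons z l ih2 =>
        simp only [List.map_cons, List.sum_cons, ih2]
        rw [List.count_cons, List.count_cons (a := v)]
        by_cases h : z = v
        · simp [h]; omega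
        · have h' : ¬ v = z := fun hh => h hh.symm
          simp [h, h']; omega
    simp only [pairsPre, pairsSuf, ih, hcnt, List.map_cons, List.sum_cons]
    omega

-- A's loop: if the dict holds the multiplicities of 'seen', the loop adds pairsPre
lemma solveA_loop (B C : Int) (xs : List Int) : ∀ (ans diff : Int)
    (d : PySem.Dict Int Int) (seen : List Int),
    (∀ v, d.getD v 0 = (seen.count v : Int)) →
    (xs.foldl (fun (s : Int × Int × PySem.Dict Int Int) x =>
      let diff1 := if x = B then s.2.1 + 1 else s.2.1
      let diff2 := if x = C then diff1 - 1 else diff1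
      let ans := s.1 + s.2.2.getD diff2 0
      (ans, diff2, s.2.2.insert diff2 (s.2.2.getD diff2 0 + 1))) (ans, diff, d)).1
    = ans + (pairsPre seen (pdiffs B C diff xs) : Int) := by
  induction xs with
  | nil => intro ans diff d seen hd; simp [pairsPre, pdiffs]
  | cons x xs ih =>
    intro ans diff d seen hd
    simp only [List.foldl_cons]
    have hstep : (if x = C then (if x = B then diff + 1 else diff) - 1
        else (if x = B then diff + 1 else diff)) = diff + dval B C x := by
      simp only [dval]; split_ifs <;> ring
    rw [hstep]
    rw [ih (ans + d.getD (diff + dval B C x) 0) (diff + dval B C x) _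
        ((diff + dval B C x) :: seen) ?_]
    · simp only [pdiffs, pairsPre, hd]
      push_cast
      ring
    · intro v
      rw [PySem.Dict.getD_insert]
      by_cases h : v = diff + dval B C x
      · simp [h, hd]
      · have h' : (diff + dval B C x ≠ v) := fun hh => h hh.symm
        simp [h, hd, h']

-- B's inner loop counts the zeros among the prefix differences started at cb - cc
lemma solveB_inner (B C : Int) (xs : List Int) : ∀ (ans cb cc : Int),
    (xs.foldl (fun (s : Int × Int × Int) x =>
        let cb := if x = B then s.2.1 + 1 else s.2.1
        let cc := if x = C then s.2.2 + 1 else s.2.2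
        let a := if cb = cc then s.1 + 1 else s.1
        (a, cb, cc)) (ans, cb, cc)).1
    = ans + ((pdiffs B C (cb - cc) xs).count 0 : Int) := by
  induction xs with
  | nil => intro ans cb cc; simp [pdiffs]
  | cons x xs ih =>
    intro ans cb cc
    simp only [List.foldl_cons]
    rw [ih]
    have harg : (if x = B then cb + 1 else cb) - (if x = C then cc + 1 else cc)
        = (cb - cc) + dval B C x := by
      simp only [dval]; split_ifs <;> ring
    have hcond : ((if x = B then cb + 1 else cb) = (if x = C then cc + 1 else cc))
        ↔ ((cb - cc) + dval B C x = 0) := by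
      constructor <;> intro h <;> [rw [← harg]; rw [← harg] at h] <;> omega
    simp only [pdiffs, List.count_cons, harg]
    by_cases h : (cb - cc) + dval B C x = 0
    · rw [if_pos (hcond.mpr h)]
      have : ((cb - cc) + dval B C x == (0:Int)) = true := by simpa using h
      simp [this]
      ring
    · rw [if_neg (fun hh => h (hcond.mp hh))]
      have : ((cb - cc) + dval B C x == (0:Int)) = false := by simpa using h
      simp [this]

-- sum of zero-counts over all suffixes = suffix-wise equal-pair count of 0 :: pdiffs
lemma sum_suffix_zero (B C : Int) (A : List Int) :
    ((List.range A.length).map (fun k => (pdiffs B C 0 (A.drop k)).count 0)).sum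
    = pairsSuf (0 :: pdiffs B C 0 A) := by
  induction A with
  | nil => simp [pairsSuf, pdiffs]
  | cons x A ih =>
    rw [List.length_cons, List.range_succ_eq_map, List.map_cons, List.map_map]
    have hdrop : ∀ k, (x :: A).drop (k + 1) = A.drop k := fun k => rfl
    simp only [Function.comp_def, Nat.succ_eq_add_one, hdrop, List.drop_zero, List.sum_cons]
    rw [ih]
    have hx : pdiffs B C 0 (x :: A) = (0 + dval B C x) :: pdiffs B C (0 + dval B C x) A := rfl
    have hshift : pdiffs B C (0 + dval B C x) A
        = (pdiffs B C 0 A).map ((dval B C x) + ·) := by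
      have : (0 : Int) + dval B C x = dval B C x + 0 := by ring
      rw [this, pdiffs_add]
    have hc : (pdiffs B C (0 + dval B C x) A).count (0 + dval B C x)
        = (pdiffs B C 0 A).count 0 := by
      rw [hshift]
      have : (0 : Int) + dval B C x = dval B C x + 0 := by ring
      rw [this, count_map_add]
    have hp : pairsSuf (pdiffs B C (0 + dval B C x) A) = pairsSuf (pdiffs B C 0 A) := by
      rw [hshift, pairsSuf_map_add]
    simp only [hx, pairsSuf, hc, hp, List.count_cons]

-- ===== VERDICT (by name: the statement is the Claim_ definition above) =====
theorem solve_spec : Claim_equal_solve := by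
  intro A B C _
  unfold Spec_solve solve solve_alt
  -- A's side
  rw [solveA_loop B C A 0 0 _ [0] ?hd]
  case hd =>
    intro v
    rw [PySem.Dict.getD_insert]
    by_cases h : v = 0
    · simp [h]
    · have h' : ¬ (0:Int) = v := fun hh => h hh.symm
      simp [h, h']
  -- B's side: reduce the inner index loop over A[j] to a fold over the suffix
  rw [PySem.List.foldl_congr_mem (PySem.List.pyRange 0 (A.length : Int) 1) _
      (fun (ans i : Int) =>
        ((A.drop i.toNat).foldl (fun (s : Int × Int × Int) x =>
          let cb := if x = B then s.2.1 + 1 else s.2.1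
          let cc := if x = C then s.2.2 + 1 else s.2.2
          let a := if cb = cc then s.1 + 1 else s.1
          (a, cb, cc)) (ans, 0, 0)).1) 0 ?g1]
  case g1 =>
    intro a i hi
    have h0 : (0:Int) ≤ i := (PySem.List.mem_pyRange_one.mp hi).1
    rw [PySem.List.foldl_pyRange_pyGetD' A 0 (fun (s : Int × Int × Int) x =>
          let cb := if x = B then s.2.1 + 1 else s.2.1
          let cc := if x = C then s.2.2 + 1 else s.2.2
          let a := if cb = cc then s.1 + 1 else s.1
          (a, cb, cc)) (a, 0, 0) h0]
  -- evaluate each inner fold, then the outer loop is a plain sum over suffixes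
  rw [PySem.List.foldl_congr_mem (PySem.List.pyRange 0 (A.length : Int) 1) _
      (fun (ans i : Int) => ans + ((pdiffs B C 0 (A.drop i.toNat)).count 0 : Int)) 0 ?g2]
  case g2 =>
    intro a i _
    rw [solveB_inner]
    norm_num
  rw [PySem.List.foldl_add]
  rw [pairsPre_eq, sum_count_singleton]
  rw [PySem.List.pyRange_one, List.map_map]
  have hmap : ((List.range ((A.length : Int) - 0).toNat).map
      ((fun i : Int => ((pdiffs B C 0 (A.drop i.toNat)).count 0 : Int)) ∘ (fun k : Nat => (0:Int) + k)))
      = (List.range A.length).map (fun k => ((pdiffs B C 0 (A.drop k)).count 0 : Int)) := by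
    simp [Function.comp_def]
  rw [hmap]
  have hsum : ((List.range A.length).map
      (fun k => ((pdiffs B C 0 (A.drop k)).count 0 : Int))).sum
      = (((List.range A.length).map (fun k => (pdiffs B C 0 (A.drop k)).count 0)).sum : Int) := by
    induction (List.range A.length) with
    | nil => simp
    | cons k l ih => simp [ih]
  rw [hsum, sum_suffix_zero]
  simp only [pairsSuf]
  push_cast
  ring
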